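-- pv_equiv track=rewrite | github.com/JoaoDaviMNunes/Cifragem_em_Bloco | cifragem.py | kama_cifra
-- ===== SOURCE A (Python) =====
-- def criar_tabela_substituicao():
--     alfabeto = 'abcdefghijklmnopqrstuvwxyz'
--     primeira_metade = alfabeto[:13]
--     segunda_metade = alfabeto[13:]
--     tabela_criptografia = {}
--
--     for i in range(len(primeira_metade)):
--         tabela_criptografia[primeira_metade[i]] = segunda_metade[i]
--         tabela_criptografia[segunda_metade[i]] = primeira_metade[i]
--
--     return tabela_criptografia
--
-- def kama_cifra(texto):
--     tabela_criptografia = criar_tabela_substituicao()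
--     texto_criptografado = []
--
--     for char in texto:
--         if char in tabela_criptografia:
--             texto_criptografado.append(tabela_criptografia[char])
--         else:
--             texto_criptografado.append(char)
--
--     return ''.join(texto_criptografado)
-- ===== SOURCE B (Python) =====
-- def kama_cifra(texto):
--     # ROT13 on lowercase letters via modular arithmetic; no substitution table.
--     return ''.join(
--         chr((ord(c) - 97 + 13) % 26 + 97) if 97 <= ord(c) <= 122 else c
--         for c in texto)
-- ===== Notes on version B (the rewrite author's own statement) =====
-- stated objective: idiomatic
-- what changed: Replaced the 26-entry substitution dict built each call by closed-form ROT13 modular arithmetic on character codes in a single generator expression.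
import Mathlib
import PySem

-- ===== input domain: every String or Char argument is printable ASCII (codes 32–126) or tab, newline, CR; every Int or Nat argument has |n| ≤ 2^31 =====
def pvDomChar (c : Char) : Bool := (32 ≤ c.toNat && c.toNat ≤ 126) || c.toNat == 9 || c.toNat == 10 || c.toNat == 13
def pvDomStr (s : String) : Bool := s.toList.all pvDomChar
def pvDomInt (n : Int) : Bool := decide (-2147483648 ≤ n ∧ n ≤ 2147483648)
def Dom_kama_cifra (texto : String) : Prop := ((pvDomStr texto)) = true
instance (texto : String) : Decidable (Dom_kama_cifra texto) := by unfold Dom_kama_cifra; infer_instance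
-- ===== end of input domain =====

-- B replaces A's per-call 26-entry substitution dict by closed-form ROT13 arithmetic on character codes (objective: idiomatic).

-- ===== PORT A =====
def criar_tabela_substituicao : PySem.Dict Char Char :=
  let alfabeto := "abcdefghijklmnopqrstuvwxyz"
  let primeira_metade := PySem.Str.slice alfabeto none (some 13)
  let segunda_metade := PySem.Str.slice alfabeto (some 13) none
  (PySem.List.pyRange 0 (PySem.Str.len primeira_metade) 1).foldl
    (fun d i =>
      let d := d.insert (PySem.List.pyGetD primeira_metade.toList i ' ')
                         (PySem.List.pyGetD segunda_metade.toList i ' ')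
      d.insert (PySem.List.pyGetD segunda_metade.toList i ' ')
               (PySem.List.pyGetD primeira_metade.toList i ' '))
    PySem.Dict.empty

def kama_cifra (texto : String) : String :=
  let tabela_criptografia := criar_tabela_substituicao
  let texto_criptografado :=
    texto.toList.foldl
      (fun acc ch =>
        if tabela_criptografia.contains ch then
          acc ++ [tabela_criptografia.getD ch ch]
        else
          acc ++ [ch])
      []
  String.ofList texto_criptografado

-- ===== PORT B =====
def kama_cifra_alt (texto : String) : String :=
  String.ofList (texto.toList.map (fun c =>
    if 97 ≤ c.toNat ∧ c.toNat ≤ 122 then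
      Char.ofNat ((c.toNat - 97 + 13) % 26 + 97)
    else c))

-- ===== PRECONDITION & SPEC =====
def Spec_kama_cifra (texto : String) (out : String) : Prop := out = kama_cifra_alt texto
instance (texto : String) (out : String) : Decidable (Spec_kama_cifra texto out) := by unfold Spec_kama_cifra; infer_instance

-- ===== CLAIM (what is proved, stated in full; the proofs are below) =====
def Claim_equal_kama_cifra : Prop := ∀ (texto : String), Dom_kama_cifra texto → Spec_kama_cifra texto (kama_cifra texto)

-- ===== LEMMAS AND PROOFS =====

-- A's per-character action (dict lookup) equals B's (ROT13 arithmetic), for every Char.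
theorem kama_char_eq (c : Char) :
    (if criar_tabela_substituicao.contains c then criar_tabela_substituicao.getD c c else c)
    = (if 97 ≤ c.toNat ∧ c.toNat ≤ 122 then Char.ofNat ((c.toNat - 97 + 13) % 26 + 97) else c) := by
  by_cases h : 97 ≤ c.toNat ∧ c.toNat ≤ 122
  · obtain ⟨h1, h2⟩ := h
    have hc := Char.ofNat_toNat c
    interval_cases hn : c.toNat <;> (subst hc; decide)
  · have hcon : criar_tabela_substituicao.contains c = false := by
      by_contra hb
      have hb' : criar_tabela_substituicao.contains c = true := by
        revert hb; cases criar_tabela_substituicao.contains c <;> simp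
      have hmem : c ∈ criar_tabela_substituicao.keys :=
        (PySem.Dict.contains_iff_mem_keys (d := criar_tabela_substituicao) (k := c)).mp hb'
      have hk : criar_tabela_substituicao.keys = "anbocpdqerfsgthuivjwkxlymz".toList := by decide
      rw [hk] at hmem
      simp at hmem
      rcases hmem with hm|hm|hm|hm|hm|hm|hm|hm|hm|hm|hm|hm|hm|hm|hm|hm|hm|hm|hm|hm|hm|hm|hm|hm|hm|hm <;>
        (subst hm; simp at h)
    simp [hcon, h]

-- A's append-in-a-loop over the table equals a map of the per-character if.
theorem kama_foldl_eq_map (xs : List Char) (acc : List Char) :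
    xs.foldl
      (fun acc ch =>
        if criar_tabela_substituicao.contains ch then
          acc ++ [criar_tabela_substituicao.getD ch ch]
        else
          acc ++ [ch])
      acc
    = acc ++ xs.map (fun c =>
        if 97 ≤ c.toNat ∧ c.toNat ≤ 122 then Char.ofNat ((c.toNat - 97 + 13) % 26 + 97) else c) := by
  induction xs generalizing acc with
  | nil => simp
  | cons x xs ih =>
      simp only [List.foldl_cons, List.map_cons]
      rw [← kama_char_eq x]
      by_cases hx : criar_tabela_substituicao.contains x
      · simp [hx, ih, List.append_assoc]
      · simp [hx, ih, List.append_assoc]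

-- ===== VERDICT (by name: the statement is the Claim_ definition above) =====
theorem kama_cifra_spec : Claim_equal_kama_cifra := by
  intro texto _
  unfold Spec_kama_cifra
  simp only [kama_cifra, kama_cifra_alt]
  rw [kama_foldl_eq_map]
  simp
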